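-- pv_equiv track=rewrite | github.com/manwar/perlweeklychallenge-club | challenge-266/lubos-kolouch/python/ch-1.py | uncommon_words
-- ===== SOURCE A (Python) =====
-- from collections import Counter
-- from typing import Tuple
--
-- def uncommon_words(line1: str, line2: str) -> Tuple[str, ...]:
--     """
--     Find all uncommon words in any order in the given two sentences.
--
--     Args:
--     line1 (str): The first sentence.
--     line2 (str): The second sentence.
--
--     Returns:
--     Tuple[str, ...]: A tuple of uncommon words. If none found, returns an empty tuple.
--     """
--     words1 = line1.split()
--     words2 = line2.split()
--
--     counter1 = Counter(words1)
--     counter2 = Counter(words2)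
--
--     uncommon = [
--         word for word in counter1 if counter1[word] == 1 and word not in counter2
--     ]
--     for word in counter2:
--         if counter2[word] == 1 and word not in counter1:
--             uncommon.append(word)
--
--     return tuple(uncommon)
-- ===== SOURCE B (Python) =====
-- from collections import Counter
--
--
-- def uncommon_words(line1: str, line2: str):
--     counts = Counter(line1.split() + line2.split())
--     return tuple(word for word, c in counts.items() if c == 1)
-- ===== Notes on version B (the rewrite author's own statement) =====
-- stated objective: simpler
-- what changed: B builds one Counter over the concatenated token lists and keeps the words of total count 1, replacing A's two counters with cross-membership checks and a second append loop.
import Mathlib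
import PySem

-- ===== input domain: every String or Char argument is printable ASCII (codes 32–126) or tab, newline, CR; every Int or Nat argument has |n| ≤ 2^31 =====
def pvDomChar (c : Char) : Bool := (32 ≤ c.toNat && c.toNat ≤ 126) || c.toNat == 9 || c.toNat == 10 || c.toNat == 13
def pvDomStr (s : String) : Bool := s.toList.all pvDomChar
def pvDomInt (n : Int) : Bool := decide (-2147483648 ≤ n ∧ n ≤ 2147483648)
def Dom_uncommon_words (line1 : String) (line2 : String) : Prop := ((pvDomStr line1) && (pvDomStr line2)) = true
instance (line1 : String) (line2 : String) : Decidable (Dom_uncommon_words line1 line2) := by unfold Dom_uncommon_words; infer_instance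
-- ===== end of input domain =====

-- B builds one Counter over the concatenated token lists and keeps the words of total
-- count 1, instead of A's two counters with cross-membership checks and a second loop.

-- ===== PORT A =====
def uncommon_words (line1 : String) (line2 : String) : List String :=
  let words1 := PySem.Str.split₀ line1
  let words2 := PySem.Str.split₀ line2
  let counter1 := PySem.Dict.counter (κ := String) words1
  let counter2 := PySem.Dict.counter (κ := String) words2
  let uncommon := counter1.keys.filter
    (fun word => counter1.getD word 0 == 1 && !(counter2.contains word))
  counter2.keys.foldl
    (fun acc word =>
      if counter2.getD word 0 == 1 && !(counter1.contains word) then acc ++ [word] else acc)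
    uncommon

-- ===== PORT B =====
def uncommon_words_alt (line1 : String) (line2 : String) : List String :=
  let counts := PySem.Dict.counter (κ := String) (PySem.Str.split₀ line1 ++ PySem.Str.split₀ line2)
  (counts.items.filter (fun p => p.2 == 1)).map (fun p => p.1)

-- ===== PRECONDITION & SPEC =====
def Spec_uncommon_words (line1 : String) (line2 : String) (out : List String) : Prop := out = uncommon_words_alt line1 line2
instance (line1 : String) (line2 : String) (out : List String) : Decidable (Spec_uncommon_words line1 line2 out) := by unfold Spec_uncommon_words; infer_instance

-- ===== CLAIM (what is proved, stated in full; the proofs are below) =====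
def Claim_equal_uncommon_words : Prop := ∀ (line1 : String) (line2 : String), Dom_uncommon_words line1 line2 → Spec_uncommon_words line1 line2 (uncommon_words line1 line2)

-- ===== LEMMAS AND PROOFS =====

-- Core list-level fact: A's two filtered passes equal B's single filter over the
-- deduplicated concatenation.
theorem uncommon_core (ws1 ws2 : List String) :
    (PySem.Set.ofList ws1).filter (fun w => ((ws1.count w : Int)) == 1 && !(ws2.contains w))
      ++ ((PySem.Set.ofList ws2).filter (fun w => ((ws2.count w : Int)) == 1 && !(ws1.contains w)))
    = (PySem.Set.ofList (ws1 ++ ws2)).filter (fun w => (((ws1 ++ ws2).count w : Int)) == 1) := by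
  rw [PySem.Set.ofList_append, PySem.Set.update_eq_append_filter, List.filter_append,
    List.filter_filter]
  congr 1
  · apply List.filter_congr
    intro w hw
    have hmem : w ∈ ws1 := (PySem.Set.mem_ofList ws1 w).mp hw
    have h1 : 1 ≤ ws1.count w := List.one_le_count_iff.mpr hmem
    simp only [List.count_append, List.contains_eq_mem]
    by_cases h2 : w ∈ ws2
    · have : 1 ≤ ws2.count w := List.one_le_count_iff.mpr h2
      simp [h2]; omega
    · have : ws2.count w = 0 := List.count_eq_zero.mpr h2
      simp [h2, this]
  · apply List.filter_congr
    intro w hw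
    have hnot : w ∉ ws1 → ws1.count w = 0 := List.count_eq_zero.mpr
    by_cases h1 : w ∈ ws1
    · simp [h1]
    · simp [h1, List.count_append, hnot h1]

-- ===== VERDICT (by name: the statement is the Claim_ definition above) =====
theorem uncommon_words_spec : Claim_equal_uncommon_words := by
  intro line1 line2 _
  show _ = _
  unfold uncommon_words uncommon_words_alt
  simp only [PySem.Dict.keys_counter, PySem.Dict.getD_counter, PySem.Dict.contains_counter,
    PySem.List.foldl_append_if_eq_filter, PySem.Dict.items_counter, List.filter_map,
    List.map_map, Function.comp_def, List.map_id']
  exact uncommon_core _ _
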